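-- pv_equiv track=rewrite | github.com/sheldonchiu/unilm | kosmos-2/demo/batch.py | merge_adjacent_words
-- ===== SOURCE A (Python) =====
-- def merge_adjacent_words(marked_words):
--     merged_words = []
--     current_word, current_flag = marked_words[0]
--
--     for word, flag in marked_words[1:]:
--         if flag == current_flag:
--             current_word += " " + word
--         else:
--             merged_words.append((current_word, current_flag))
--             current_word = word
--             current_flag = flag
--
--     merged_words.append((current_word, current_flag))
--     return merged_words
-- ===== SOURCE B (Python) =====
-- def merge_adjacent_words(marked_words):
--     # Phase 1: group consecutive entries into runs of word-lists sharing a flag.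
--     runs = []
--     for word, flag in marked_words:
--         if runs and runs[-1][1] == flag:
--             runs[-1][0].append(word)
--         else:
--             runs.append(([word], flag))
--     # Phase 2: join each run's words with a single space.
--     return [(" ".join(words), flag) for words, flag in runs]
-- ===== Notes on version B (the rewrite author's own statement) =====
-- stated objective: idiomatic
-- what changed: B replaces A's stateful pass that concatenates into a growing current_word string with a group-then-join decomposition: one pass collects maximal runs of words as lists, then each run is joined with ' ' at the end.
import Mathlib
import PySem

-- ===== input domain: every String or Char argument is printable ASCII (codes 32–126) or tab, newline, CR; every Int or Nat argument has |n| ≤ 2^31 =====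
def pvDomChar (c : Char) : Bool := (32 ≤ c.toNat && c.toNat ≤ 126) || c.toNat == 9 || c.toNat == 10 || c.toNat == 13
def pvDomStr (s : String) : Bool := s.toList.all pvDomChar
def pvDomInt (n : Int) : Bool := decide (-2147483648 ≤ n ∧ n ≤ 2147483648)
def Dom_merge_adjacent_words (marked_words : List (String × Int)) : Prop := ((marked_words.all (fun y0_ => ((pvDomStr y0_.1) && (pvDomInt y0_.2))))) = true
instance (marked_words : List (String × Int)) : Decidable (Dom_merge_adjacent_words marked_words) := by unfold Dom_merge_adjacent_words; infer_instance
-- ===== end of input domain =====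

-- B replaces A's stateful string-accumulating pass with a group-then-join decomposition (same cost, more idiomatic).

-- ===== PORT A =====
-- A's for-loop over marked_words[1:] with state (merged_words, current_word, current_flag)
def pvALoop : List (String × Int) → String → Int → List (String × Int) → List (String × Int)
  | [], cw, cf, acc => acc ++ [(cw, cf)]
  | (w, f) :: rest, cw, cf, acc =>
    if f == cf then pvALoop rest (cw ++ " " ++ w) cf acc
    else pvALoop rest w f (acc ++ [(cw, cf)])

def merge_adjacent_words (marked_words : List (String × Int)) : List (String × Int) :=
  match marked_words with
  | [] => []  -- Python raises IndexError here (marked_words[0]); excluded by Pre_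
  | (w, f) :: rest => pvALoop rest w f []

-- ===== PORT B =====
-- B's phase 1: 'runs[-1][0].append(word)' becomes replacing the last run; 'runs.append(...)' becomes ++ [...]
def pvBLoop : List (String × Int) → List (List String × Int) → List (List String × Int)
  | [], runs => runs
  | (w, f) :: rest, runs =>
    match runs.getLast? with
    | some (ws, g) =>
      if g == f then pvBLoop rest (runs.dropLast ++ [(ws ++ [w], g)])
      else pvBLoop rest (runs ++ [([w], f)])
    | none => pvBLoop rest [([w], f)]

-- B's phase 2: per-run " ".join ports to PySem.Str.join " " (exact)
def merge_adjacent_words_alt (marked_words : List (String × Int)) : List (String × Int) :=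
  (pvBLoop marked_words []).map (fun p => (PySem.Str.join " " p.1, p.2))

-- ===== PRECONDITION & SPEC =====
-- Pre_ excludes only the empty list, on which Python A raises IndexError (marked_words[0]).
def Pre_merge_adjacent_words (marked_words : List (String × Int)) : Prop := marked_words ≠ []
instance (marked_words : List (String × Int)) : Decidable (Pre_merge_adjacent_words marked_words) := by unfold Pre_merge_adjacent_words; infer_instance
def pvWitness_merge_adjacent_words : (List (String × Int)) := [("hello", 1), ("world", 1), ("x", 0)]

def Spec_merge_adjacent_words (marked_words : List (String × Int)) (out : List (String × Int)) : Prop := out = merge_adjacent_words_alt marked_words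
instance (marked_words : List (String × Int)) (out : List (String × Int)) : Decidable (Spec_merge_adjacent_words marked_words out) := by unfold Spec_merge_adjacent_words; infer_instance

-- ===== CLAIM (what is proved, stated in full; the proofs are below) =====
def Claim_equal_merge_adjacent_words : Prop := ∀ (marked_words : List (String × Int)), Dom_merge_adjacent_words marked_words → Pre_merge_adjacent_words marked_words → Spec_merge_adjacent_words marked_words (merge_adjacent_words marked_words)

-- ===== LEMMAS AND PROOFS =====

theorem pv_chars_join_concat (sep p : List Char) (l : List (List Char)) (h : l ≠ []) :
    PySem.Chars.join sep (l ++ [p]) = PySem.Chars.join sep l ++ sep ++ p := by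
  induction l with
  | nil => exact absurd rfl h
  | cons a t ih =>
    cases t with
    | nil => simp [PySem.Chars.join_cons_cons, PySem.Chars.join_singleton]
    | cons b t' =>
      have := ih (by simp)
      simp only [List.cons_append, PySem.Chars.join_cons_cons] at this ⊢
      rw [this]
      simp [List.append_assoc]

theorem pv_join_concat (ws : List String) (w : String) (h : ws ≠ []) :
    PySem.Str.join " " (ws ++ [w]) = PySem.Str.join " " ws ++ " " ++ w := by
  rw [← String.toList_inj]
  simp only [PySem.Str.toList_join, List.map_append, List.map_cons, List.map_nil,
    String.toList_append]
  exact pv_chars_join_concat _ _ _ (by simpa using h)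

theorem pv_join_singleton (w : String) : PySem.Str.join " " [w] = w := by
  rw [← String.toList_inj]
  simp [PySem.Str.toList_join, PySem.Chars.join_singleton]

theorem pv_main (rest : List (String × Int)) :
    ∀ (R : List (List String × Int)) (ws : List String) (cf : Int), ws ≠ [] →
    pvALoop rest (PySem.Str.join " " ws) cf (R.map (fun p => (PySem.Str.join " " p.1, p.2)))
      = (pvBLoop rest (R ++ [(ws, cf)])).map (fun p => (PySem.Str.join " " p.1, p.2)) := by
  induction rest with
  | nil =>
    intro R ws cf _
    simp [pvALoop, pvBLoop]
  | cons hd tl ih =>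
    intro R ws cf hws
    obtain ⟨w, f⟩ := hd
    simp only [pvALoop, pvBLoop, List.getLast?_concat, List.dropLast_concat]
    by_cases hf : f = cf
    · subst hf
      simp only [beq_self_eq_true, if_true]
      rw [← pv_join_concat ws w hws]
      exact ih R (ws ++ [w]) f (by simp)
    · have h1 : (f == cf) = false := beq_eq_false_iff_ne.mpr hf
      have h2 : (cf == f) = false := beq_eq_false_iff_ne.mpr (Ne.symm hf)
      simp only [h1, h2]
      have := ih (R ++ [(ws, cf)]) [w] f (by simp)
      rw [pv_join_singleton] at this
      simpa [List.map_append] using this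

-- ===== VERDICT (by name: the statement is the Claim_ definition above) =====
theorem merge_adjacent_words_spec : Claim_equal_merge_adjacent_words := by
  intro mw _ hpre
  unfold Spec_merge_adjacent_words
  match mw with
  | [] => exact absurd rfl hpre
  | (w, f) :: rest =>
    show pvALoop rest w f [] = _
    unfold merge_adjacent_words_alt
    have h := pv_main rest [] [w] f (by simp)
    rw [pv_join_singleton] at h
    simpa [pvBLoop] using h
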